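-- pv_equiv track=rewrite | github.com/KalChe/poker-gto | utils/cards.py | straight_high_rank
-- ===== SOURCE A (Python) =====
-- from typing import List, Tuple
--
-- def straight_high_rank(ranks: List[int]) -> int | None:
--     uniq = sorted(set(ranks), reverse=True)
--     if len(uniq) < 5:
--         if set([12, 3, 2, 1, 0]).issubset(set(ranks)):
--             return 3
--         return None
--     for i in range(len(uniq) - 4):
--         window = uniq[i:i + 5]
--         if window[0] - window[4] == 4:
--             return window[0]
--     if set([12, 3, 2, 1, 0]).issubset(set(ranks)):
--         return 3
--     return None
-- ===== SOURCE B (Python) =====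
-- def straight_high_rank(ranks):
--     present = set(ranks)
--     best = None
--     for h in present:
--         if all(x in present for x in (h, h - 1, h - 2, h - 3, h - 4)):
--             if best is None or h > best:
--                 best = h
--     if best is not None:
--         return best
--     if {12, 3, 2, 1, 0} <= present:
--         return 3
--     return None
-- ===== Notes on version B (the rewrite author's own statement) =====
-- stated objective: alternative
-- what changed: Instead of sorting the distinct ranks and sliding a 5-wide window over the sorted list, B never sorts: it scans the set once, tests each rank h by set membership of h..h-4, and keeps the maximum such h.
import Mathlib
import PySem

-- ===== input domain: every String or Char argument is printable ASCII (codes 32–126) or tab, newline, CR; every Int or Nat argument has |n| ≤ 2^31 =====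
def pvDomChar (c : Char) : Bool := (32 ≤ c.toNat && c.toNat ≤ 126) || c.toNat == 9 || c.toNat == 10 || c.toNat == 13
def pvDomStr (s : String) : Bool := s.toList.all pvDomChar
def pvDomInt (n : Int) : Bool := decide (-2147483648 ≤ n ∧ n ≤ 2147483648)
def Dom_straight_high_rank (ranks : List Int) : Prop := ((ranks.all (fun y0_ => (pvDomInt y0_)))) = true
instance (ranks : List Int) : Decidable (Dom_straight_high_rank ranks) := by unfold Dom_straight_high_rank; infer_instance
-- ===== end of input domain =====

-- B replaces A's sort-and-slide-5-window by a single membership scan of the set keeping the maximal straight high card; same return value, no speed claim.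

-- ===== PORT A =====
-- A's loop 'for i in range(len(uniq)-4)' slides a 5-window; window uniq[i:i+5] is the
-- first five of the i-th tail, so the loop is the tail recursion below: at tail a :: t,
-- window[0] = a, window[4] = t[3], and the loop body runs exactly while t[3]? is some.
def pvScanA : List Int → Option Int
  | [] => none
  | a :: t =>
    match t[3]? with
    | some e => if a - e = 4 then some a else pvScanA t
    | none => none

def straight_high_rank (ranks : List Int) : Option Int :=
  let uniq := PySem.List.sorted (PySem.Set.ofList ranks) (fun x => x) true
  if uniq.length < 5 then
    (if PySem.Set.issubset (PySem.Set.ofList ([12, 3, 2, 1, 0] : List Int)) (PySem.Set.ofList ranks) then some 3 else none)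
  else
    match pvScanA uniq with
    | some a => some a
    | none => if PySem.Set.issubset (PySem.Set.ofList ([12, 3, 2, 1, 0] : List Int)) (PySem.Set.ofList ranks) then some 3 else none

-- ===== PORT B =====
def pvPredB (present : List Int) (h : Int) : Bool :=
  [h, h - 1, h - 2, h - 3, h - 4].all (fun x => present.contains x)

def straight_high_rank_alt (ranks : List Int) : Option Int :=
  let present := PySem.Set.ofList ranks
  let best := present.foldl (fun best h =>
    if pvPredB present h then
      match best with
      | none => some h
      | some b => if h > b then some h else some b
    else best) none
  match best with
  | some b => some b
  | none => if PySem.Set.issubset (PySem.Set.ofList ([12, 3, 2, 1, 0] : List Int)) present then some 3 else none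

-- ===== PRECONDITION & SPEC =====
def Spec_straight_high_rank (ranks : List Int) (out : Option Int) : Prop := out = straight_high_rank_alt ranks
instance (ranks : List Int) (out : Option Int) : Decidable (Spec_straight_high_rank ranks out) := by unfold Spec_straight_high_rank; infer_instance

-- ===== CLAIM (what is proved, stated in full; the proofs are below) =====
def Claim_equal_straight_high_rank : Prop := ∀ (ranks : List Int), Dom_straight_high_rank ranks → Spec_straight_high_rank ranks (straight_high_rank ranks)

-- ===== LEMMAS AND PROOFS =====
-- pvPredB only depends on the membership of its first argument
theorem pvPredB_ext (s t : List Int) (hm : ∀ y : Int, y ∈ s ↔ y ∈ t) : pvPredB s = pvPredB t := by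
  funext h
  rw [pvPredB, pvPredB, Bool.eq_iff_iff]
  simp only [List.all_eq_true, List.contains_iff_mem, hm]

-- a rank satisfying pvPredB s forces 5 distinct elements in s
theorem pvPredB_len (s : List Int) (x : Int) (hx : pvPredB s x = true) : 5 ≤ s.length := by
  simp only [pvPredB, List.all_eq_true] at hx
  have hsub : [x, x - 1, x - 2, x - 3, x - 4] ⊆ s := by
    intro y hy; exact List.contains_iff_mem.mp (hx y hy)
  have hnd5 : ([x, x - 1, x - 2, x - 3, x - 4]).Nodup := by
    simp [List.Nodup]; omega
  have := (hnd5.subperm hsub).length_le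
  simpa using this

theorem pairwise_gt_of_ge_nodup (l : List Int) (h1 : l.Pairwise (fun a b => b ≤ a)) (h2 : l.Nodup) :
    l.Pairwise (· > ·) :=
  (h1.and h2).imp (fun hab => lt_of_le_of_ne hab.1 hab.2.symm)

theorem head?_eq_max?_of_desc (l : List Int) (h : l.Pairwise (· > ·)) : l.head? = l.max? := by
  cases l with
  | nil => rfl
  | cons a t =>
    have ha : ∀ b ∈ t, b < a := (List.pairwise_cons.mp h).1
    rw [List.head?_cons]
    symm
    rw [List.max?_eq_some_iff]
    refine ⟨List.mem_cons_self, ?_⟩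
    intro b hb
    rcases List.mem_cons.mp hb with rfl | hb
    · exact le_refl _
    · exact le_of_lt (ha b hb)

theorem max?_perm (l m : List Int) (h : l.Perm m) : l.max? = m.max? := by
  cases hl : l.max? with
  | none =>
    rw [List.max?_eq_none_iff] at hl
    subst hl
    exact (List.max?_eq_none_iff.mpr (List.Perm.nil_eq h).symm).symm
  | some a =>
    rw [List.max?_eq_some_iff] at hl
    symm
    rw [List.max?_eq_some_iff]
    exact ⟨h.mem_iff.mp hl.1, fun b hb => hl.2 b (h.mem_iff.mpr hb)⟩

-- B's fold with a some accumulator is a running max of the filtered list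
theorem foldB_some (p : Int → Bool) : ∀ (l : List Int) (b : Int),
    l.foldl (fun best h =>
      if p h then
        match best with
        | none => some h
        | some b => if h > b then some h else some b
      else best) (some b) = some ((l.filter p).foldl max b) := by
  intro l
  induction l with
  | nil => intro b; rfl
  | cons h t ih =>
    intro b
    by_cases hp : p h = true
    · simp only [List.foldl_cons, hp, if_pos, List.filter_cons_of_pos hp]
      have hmax : (if h > b then some h else some b) = some (max b h) := by
        rcases lt_trichotomy b h with hlt | heq | hgt
        · rw [if_pos hlt, max_eq_right hlt.le]
        · subst heq; simp
        · rw [if_neg (by omega), max_eq_left hgt.le]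
      rw [hmax, ih]
    · simp only [List.foldl_cons, List.filter_cons_of_neg (by simpa using hp)]
      rw [if_neg (by simpa using hp)]
      exact ih b

theorem foldB_none (p : Int → Bool) : ∀ (l : List Int),
    l.foldl (fun best h =>
      if p h then
        match best with
        | none => some h
        | some b => if h > b then some h else some b
      else best) none = (l.filter p).max? := by
  intro l
  induction l with
  | nil => rfl
  | cons h t ih =>
    by_cases hp : p h = true
    · simp only [List.foldl_cons, hp, if_pos, List.filter_cons_of_pos hp]
      rw [foldB_some]
      rfl
    · simp only [List.foldl_cons, List.filter_cons_of_neg (by simpa using hp)]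
      rw [if_neg (by simpa using hp)]
      exact ih
-- A's window scan over a strictly descending list finds the first (= highest) straight top
theorem scanA_eq_find : ∀ (u : List Int), u.Pairwise (· > ·) → pvScanA u = u.find? (pvPredB u) := by
  intro u
  induction u with
  | nil => intro _; rfl
  | cons a t ih =>
    intro hp
    obtain ⟨ha, hpt⟩ := List.pairwise_cons.mp hp
    have htrans : ∀ x ∈ t, pvPredB (a :: t) x = pvPredB t x := by
      intro x hx
      have hxa : x < a := ha x hx
      rw [pvPredB, pvPredB, Bool.eq_iff_iff]
      simp only [List.all_eq_true, List.contains_iff_mem, List.mem_cons]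
      constructor
      · intro hall y hy
        have hyx : y ≤ x := by
          rcases hy with rfl | rfl | rfl | rfl | hy
          · omega
          · omega
          · omega
          · omega
          · rcases hy with rfl | hy
            · omega
            · simp at hy
        rcases hall y hy with rfl | hmem
        · exfalso; omega
        · exact hmem
      · intro hall y hy
        exact Or.inr (hall y hy)
    cases h3 : t[3]? with
    | none =>
      simp only [pvScanA, h3]
      symm
      rw [List.find?_eq_none]
      intro x _ hpx
      have h5 := pvPredB_len (a :: t) x hpx
      have hle : t.length ≤ 3 := List.getElem?_eq_none_iff.mp h3
      simp only [List.length_cons] at h5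
      omega
    | some e =>
      obtain ⟨hlt, he⟩ := List.getElem?_eq_some_iff.mp h3
      have h0 : (0 : ℕ) < t.length := by omega
      have h1 : (1 : ℕ) < t.length := by omega
      have h2 : (2 : ℕ) < t.length := by omega
      have hptg := List.pairwise_iff_getElem.mp hpt
      have c01 : t[0] > t[1] := hptg 0 1 h0 h1 (by omega)
      have c12 : t[1] > t[2] := hptg 1 2 h1 h2 (by omega)
      have c23 : t[2] > t[3] := hptg 2 3 h2 hlt (by omega)
      have ca : a > t[0] := ha _ (t.getElem_mem h0)
      have C : (a - e = 4) ↔ pvPredB (a :: t) a = true := by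
        constructor
        · intro h4
          have e0 : t[0] = a - 1 := by omega
          have e1 : t[1] = a - 2 := by omega
          have e2 : t[2] = a - 3 := by omega
          have e3 : t[3] = a - 4 := by omega
          have m1 : a - 1 ∈ t := e0 ▸ t.getElem_mem h0
          have m2 : a - 2 ∈ t := e1 ▸ t.getElem_mem h1
          have m3 : a - 3 ∈ t := e2 ▸ t.getElem_mem h2
          have m4 : a - 4 ∈ t := e3 ▸ t.getElem_mem hlt
          rw [pvPredB]
          simp only [List.all_eq_true, List.contains_iff_mem, List.mem_cons]
          intro y hy
          rcases hy with rfl | rfl | rfl | rfl | hy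
          · exact Or.inl rfl
          · exact Or.inr m1
          · exact Or.inr m2
          · exact Or.inr m3
          · rcases hy with rfl | hy
            · exact Or.inr m4
            · simp at hy
        · intro hpB
          rw [pvPredB] at hpB
          simp only [List.all_eq_true, List.contains_iff_mem] at hpB
          have mt : ∀ k : Int, 1 ≤ k → k ≤ 4 → a - k ∈ t := by
            intro k hk1 hk4
            have hm : a - k ∈ a :: t := by
              apply hpB
              simp only [List.mem_cons]
              omega
            rcases List.mem_cons.mp hm with hak | hmt
            · exfalso; omega
            · exact hmt
          obtain ⟨i1, hi1, e1⟩ := List.mem_iff_getElem.mp (mt 1 (by omega) (by omega))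
          obtain ⟨i2, hi2, e2⟩ := List.mem_iff_getElem.mp (mt 2 (by omega) (by omega))
          obtain ⟨i3, hi3, e3⟩ := List.mem_iff_getElem.mp (mt 3 (by omega) (by omega))
          obtain ⟨i4, hi4, e4⟩ := List.mem_iff_getElem.mp (mt 4 (by omega) (by omega))
          have hord : ∀ i j (hi : i < t.length) (hj : j < t.length), t[i] > t[j] → i < j := by
            intro i j hi hj hgt
            rcases lt_trichotomy i j with hij | hij | hij
            · exact hij
            · exfalso; subst hij; omega
            · exfalso; have := hptg j i hj hi hij; omega
          have o12 : i1 < i2 := hord i1 i2 hi1 hi2 (by omega)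
          have o23 : i2 < i3 := hord i2 i3 hi2 hi3 (by omega)
          have o34 : i3 < i4 := hord i3 i4 hi3 hi4 (by omega)
          have hi43 : 3 ≤ i4 := by omega
          have ht3 : t[3] ≥ a - 4 := by
            rcases Nat.lt_or_ge 3 i4 with hlt34 | hge
            · have := hptg 3 i4 (by omega) hi4 hlt34; omega
            · have : i4 = 3 := by omega
              subst this; omega
          omega
      simp only [pvScanA, h3]
      by_cases h4 : a - e = 4
      · rw [if_pos h4, List.find?_cons_of_pos (C.mp h4)]
      · rw [if_neg h4]
        have hpa : ¬ pvPredB (a :: t) a = true := fun hc => h4 (C.mpr hc)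
        rw [List.find?_cons_of_neg hpa, ih hpt, ← List.head?_filter, ← List.head?_filter,
          List.filter_congr htrans]

-- ===== VERDICT (by name: the statement is the Claim_ definition above) =====
theorem straight_high_rank_spec : Claim_equal_straight_high_rank := by
  unfold Claim_equal_straight_high_rank Spec_straight_high_rank
  intro ranks _
  simp only [straight_high_rank, straight_high_rank_alt]
  set s := PySem.Set.ofList ranks with hs
  set u := PySem.List.sorted s (fun x => x) true with hu
  have hperm : u.Perm s := PySem.List.sorted_perm s (fun x => x) true
  have hnd : s.Nodup := PySem.Set.nodup_ofList ranks
  have hndu : u.Nodup := hperm.nodup_iff.mpr hnd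
  have hpair : u.Pairwise (· > ·) :=
    pairwise_gt_of_ge_nodup u (PySem.List.sorted_pairwise_rev s (fun x => x)) hndu
  have hmem : ∀ y : Int, y ∈ u ↔ y ∈ s := fun y => hperm.mem_iff
  have hpredeq : pvPredB u = pvPredB s := pvPredB_ext u s hmem
  have hlen : u.length = s.length := hperm.length_eq
  have hfind : pvScanA u = (s.filter (pvPredB s)).max? := by
    rw [scanA_eq_find u hpair, hpredeq, ← List.head?_filter,
      head?_eq_max?_of_desc _ (hpair.filter _), max?_perm _ _ (hperm.filter _)]
  rw [foldB_none (pvPredB s) s]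
  by_cases hl5 : u.length < 5
  · rw [if_pos hl5]
    have hfe : s.filter (pvPredB s) = [] :=
      List.filter_eq_nil_iff.mpr (fun x _ hpx => absurd (pvPredB_len s x hpx) (by omega))
    rw [hfe]
    rfl
  · rw [if_neg hl5, ← hfind]
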